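-- pv_equiv track=rewrite | github.com/Souravroy0407/NoiRAG | noirag/preprocessing/rule_based/cleaner.py | repair_broken_lines
-- ===== SOURCE A (Python) =====
-- def repair_broken_lines(text: str) -> str:
--     """Heuristic to merge lines that were arbitrarily broken mid-sentence."""
--     lines = text.split('\n')
--     if not lines:
--         return text
--
--     merged = [lines[0]]
--     for i in range(1, len(lines)):
--         curr_line = lines[i]
--         prev_line = merged[-1]
--
--         if not curr_line.strip():
--             merged.append(curr_line)
--             continue
--
--         if not prev_line.strip():
--             merged.append(curr_line)
--             continue
--
--         # If prev_line doesn't end with sentence-ending punctuation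
--         # and curr_line doesn't start with an uppercase letter, they might be broken.
--         # The injector breaks randomly (e.g. `line[:mid] + "\n" + line[mid:]`).
--         prev_last_char = prev_line.rstrip()[-1] if prev_line.rstrip() else ''
--         curr_first_char = curr_line.lstrip()[0] if curr_line.lstrip() else ''
--
--         if prev_last_char and prev_last_char not in '.!?:"\'' and curr_first_char and curr_first_char.islower():
--             # Merge them
--             merged[-1] = prev_line + curr_line
--         else:
--             merged.append(curr_line)
--
--     return '\n'.join(merged)
-- ===== SOURCE B (Python) =====
-- def _last_sig(line: str) -> str:
--     """Last non-whitespace character of line, or '' if line is blank."""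
--     for ch in reversed(line):
--         if not ch.isspace():
--             return ch
--     return ''
--
--
-- def _first_sig(rest: str) -> str:
--     """First non-whitespace char of rest before its first newline, or ''."""
--     for ch in rest:
--         if ch == '\n':
--             return ''
--         if not ch.isspace():
--             return ch
--     return ''
--
--
-- def repair_broken_lines(text: str) -> str:
--     """Heuristic to merge lines that were arbitrarily broken mid-sentence."""
--     pieces = []
--     rest = text
--     while True:
--         i = rest.find('\n')
--         if i == -1:
--             pieces.append(rest)
--             return ''.join(pieces)
--         line, rest = rest[:i], rest[i + 1:]
--         p = _last_sig(line)
--         c = _first_sig(rest)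
--         keep = (not p) or p in '.!?:"\'' or (not c) or (not c.islower())
--         pieces.append(line + '\n' if keep else line)
-- ===== Notes on version B (the rewrite author's own statement) =====
-- stated objective: alternative
-- what changed: B never splits the text into a line list or maintains A's merged-list accumulator with last-element mutation: it streams over the raw string with str.find, and at each newline decides locally via two direct character scans (backward over the preceding line, forward up to the next newline) whether to emit the newline, appending flat pieces joined once at the end; this is correct because a merge never changes the significant characters adjacent to a later boundary.
import Mathlib
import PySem

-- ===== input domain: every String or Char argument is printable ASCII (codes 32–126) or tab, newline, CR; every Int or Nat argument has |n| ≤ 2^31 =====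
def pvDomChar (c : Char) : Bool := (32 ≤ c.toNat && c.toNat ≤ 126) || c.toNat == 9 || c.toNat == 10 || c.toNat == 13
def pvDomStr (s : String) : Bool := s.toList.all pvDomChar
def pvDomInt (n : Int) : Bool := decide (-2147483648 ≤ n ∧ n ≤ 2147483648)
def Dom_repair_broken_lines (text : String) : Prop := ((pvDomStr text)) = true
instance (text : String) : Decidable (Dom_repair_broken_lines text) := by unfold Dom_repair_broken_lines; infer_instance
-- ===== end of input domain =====

-- B streams over the raw string with find('\n') and two local character scans per
-- newline instead of A's split-into-lines pass with a mutated merged-list accumulator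
-- (alternative decomposition, same return value).

-- ===== PORT A =====
-- one loop iteration of A: append curr, or merge it into the last element of merged
def pvStepA (merged : List (List Char)) (curr : List Char) : List (List Char) :=
  let prev := (PySem.List.pyGet? merged (-1)).getD []
  if PySem.Chars.strip curr = [] then merged ++ [curr]
  else if PySem.Chars.strip prev = [] then merged ++ [curr]
  else
    let plc : Option Char :=
      if PySem.Chars.rstrip prev ≠ [] then PySem.List.pyGet? (PySem.Chars.rstrip prev) (-1) else none
    let cfc : Option Char :=
      if PySem.Chars.lstrip curr ≠ [] then PySem.List.pyGet? (PySem.Chars.lstrip curr) 0 else none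
    match plc, cfc with
    | some p, some c =>
        if p ∉ ['.', '!', '?', ':', '"', '\''] ∧ PySem.Chars.islower c
        then merged.dropLast ++ [prev ++ curr]
        else merged ++ [curr]
    | _, _ => merged ++ [curr]

def repair_broken_lines (text : String) : String :=
  let lines := PySem.Chars.splitOn text.toList ['\n']
  match lines with
  | [] => text
  | l0 :: _ =>
    let merged := (PySem.List.pyRange 1 (PySem.List.len lines)).foldl
      (fun m i => pvStepA m (PySem.List.pyGetD lines i [])) [l0]
    String.ofList (PySem.Chars.join ['\n'] merged)

-- ===== PORT B =====
-- _last_sig: 'for ch in reversed(line): if not ch.isspace(): return ch' ; none = Python ''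
def pvLastSigC (line : List Char) : Option Char :=
  line.reverse.find? (fun ch => !PySem.Chars.isspace ch)

-- _first_sig: forward scan, stopping at '\n'; none = Python ''
def pvFirstSigC : List Char → Option Char
  | [] => none
  | ch :: t =>
    if ch = '\n' then none
    else if !PySem.Chars.isspace ch then some ch
    else pvFirstSigC t

-- keep = (not p) or p in '.!?:"\'' or (not c) or (not c.islower())
def pvKeep : Option Char → Option Char → Bool
  | none, _ => true
  | some _, none => true
  | some p, some c =>
    ['.', '!', '?', ':', '"', '\''].contains p || !PySem.Chars.islower c

-- the while loop of B; i ≥ 0 in the else branch, so rest[:i] / rest[i+1:] are take/drop (exact)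
def pvLoopB (rest : List Char) (pieces : List (List Char)) : List (List Char) :=
  let i := PySem.Chars.find rest ['\n']
  if i = -1 then pieces ++ [rest]
  else
    let line := rest.take i.toNat
    let rest' := rest.drop (i.toNat + 1)
    pvLoopB rest' (pieces ++ [line ++ if pvKeep (pvLastSigC line) (pvFirstSigC rest') then ['\n'] else []])
termination_by rest.length
decreasing_by
  rename_i h
  have hne : rest ≠ [] := by
    intro he
    subst he
    exact h (by decide)
  have : 0 < rest.length := List.length_pos_iff.mpr hne
  simp only [List.length_drop]
  omega

-- ''.join(pieces)
def repair_broken_lines_alt (text : String) : String :=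
  String.ofList (pvLoopB text.toList []).flatten

-- ===== PRECONDITION & SPEC =====
def Spec_repair_broken_lines (text : String) (out : String) : Prop := out = repair_broken_lines_alt text
instance (text : String) (out : String) : Decidable (Spec_repair_broken_lines text out) := by unfold Spec_repair_broken_lines; infer_instance

-- ===== CLAIM (what is proved, stated in full; the proofs are below) =====
def Claim_equal_repair_broken_lines : Prop := ∀ (text : String), Dom_repair_broken_lines text → Spec_repair_broken_lines text (repair_broken_lines text)

-- ===== LEMMAS AND PROOFS =====

-- the per-boundary merge condition, as a predicate on the two adjacent original lines
def pvJoins (prev curr : List Char) : Bool :=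
  let p := PySem.Chars.rstrip prev
  let c := PySem.Chars.lstrip curr
  !p.isEmpty && !c.isEmpty &&
    !(['.', '!', '?', ':', '"', '\''].contains ((PySem.List.pyGet? p (-1)).getD ' ')) &&
    PySem.Chars.islower ((PySem.List.pyGet? c 0).getD ' ')

-- reference splitter: split a char list on '\n'
def pvF : List Char → List (List Char)
  | [] => [[]]
  | c :: t =>
    if c = '\n' then [] :: pvF t
    else
      match pvF t with
      | [] => [[c]]
      | h :: r => (c :: h) :: r

theorem pvF_ne_nil (s : List Char) : pvF s ≠ [] := by
  cases s with
  | nil => simp [pvF]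
  | cons c t =>
    simp only [pvF]
    split
    · simp
    · split <;> simp

theorem pvGet_neg_one {α : Type} (l : List α) : PySem.List.pyGet? l (-1) = l.getLast? := by
  cases l with
  | nil => simp [PySem.List.pyGet?, PySem.List.pyIdx?]
  | cons a t =>
    simp only [PySem.List.pyGet?, PySem.List.pyIdx?]
    rw [List.getLast?_eq_getElem?]
    norm_num

theorem pvGet_zero {α : Type} (l : List α) : PySem.List.pyGet? l 0 = l.head? := by
  cases l <;> simp [PySem.List.pyGet?, PySem.List.pyIdx?]

theorem pvDropWhile_all (p : Char → Bool) (s : List Char) :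
    (∀ c ∈ List.dropWhile p s, p c) ↔ ∀ c ∈ s, p c := by
  induction s with
  | nil => simp
  | cons a t ih =>
    by_cases h : p a = true
    · simpa [List.dropWhile, h] using ih
    · simp [List.dropWhile, h]

theorem pvRstrip_eq_nil_iff (s : List Char) :
    PySem.Chars.rstrip s = [] ↔ ∀ c ∈ s, PySem.Chars.isspace c := by
  simp [PySem.Chars.rstrip, List.dropWhile_eq_nil_iff]

theorem pvLstrip_eq_nil_iff (s : List Char) :
    PySem.Chars.lstrip s = [] ↔ ∀ c ∈ s, PySem.Chars.isspace c := by
  simp [PySem.Chars.lstrip, List.dropWhile_eq_nil_iff]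

theorem pvStrip_eq_nil_iff (s : List Char) :
    PySem.Chars.strip s = [] ↔ ∀ c ∈ s, PySem.Chars.isspace c := by
  rw [PySem.Chars.strip, pvRstrip_eq_nil_iff, PySem.Chars.lstrip, pvDropWhile_all]

theorem pvRstrip_append (q s : List Char) (h : PySem.Chars.rstrip s ≠ []) :
    PySem.Chars.rstrip (q ++ s) = q ++ PySem.Chars.rstrip s := by
  simp only [PySem.Chars.rstrip, List.reverse_append, List.dropWhile_append]
  have : (List.dropWhile PySem.Chars.isspace s.reverse).isEmpty = false := by
    simp only [PySem.Chars.rstrip] at h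
    simp only [List.isEmpty_eq_false_iff]
    intro hx
    exact h (by rw [hx]; rfl)
  simp [this]

theorem pvJoin_cons (sep a : List Char) (L : List (List Char)) (h : L ≠ []) :
    PySem.Chars.join sep (a :: L) = a ++ sep ++ PySem.Chars.join sep L := by
  cases L with
  | nil => exact absurd rfl h
  | cons b u => exact PySem.Chars.join_cons_cons sep a b u

theorem pvJoin_append_singleton (sep : List Char) (acc : List (List Char)) (c : List Char)
    (h : acc ≠ []) :
    PySem.Chars.join sep (acc ++ [c]) = PySem.Chars.join sep acc ++ sep ++ c := by
  induction acc with
  | nil => simp at h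
  | cons a t ih =>
    cases t with
    | nil => simp [PySem.Chars.join_cons_cons, PySem.Chars.join_singleton]
    | cons b u =>
      rw [List.cons_append, pvJoin_cons sep a ((b :: u) ++ [c]) (by simp),
        ih (by simp), pvJoin_cons sep a (b :: u) (by simp)]
      simp

theorem pvJoin_mutate_last (sep : List Char) (acc : List (List Char)) (x c : List Char)
    (h : acc.getLast? = some x) :
    PySem.Chars.join sep (acc.dropLast ++ [x ++ c]) = PySem.Chars.join sep acc ++ c := by
  induction acc with
  | nil => simp at h
  | cons a t ih =>
    cases t with
    | nil =>
      simp only [List.getLast?_singleton, Option.some.injEq] at h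
      subst h
      simp [PySem.Chars.join_singleton]
    | cons b u =>
      have h' : (b :: u).getLast? = some x := by
        rw [List.getLast?_cons_cons] at h
        exact h
      rw [List.dropLast_cons_of_ne_nil (by simp), List.cons_append,
        pvJoin_cons sep a ((b :: u).dropLast ++ [x ++ c]) (by simp),
        ih h', pvJoin_cons sep a (b :: u) (by simp)]
      simp

-- splitOn.go computes acc.reverse ++ (first piece prefixed by cur.reverse) of pvF
def pvConsFirst (pre : List Char) : List (List Char) → List (List Char)
  | [] => [pre]
  | h :: r => (pre ++ h) :: r

theorem pvGo_eq (fuel : Nat) : ∀ (l cur : List Char) (acc : List (List Char)),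
    l.length ≤ fuel →
    PySem.Chars.splitOn.go ['\n'] fuel l cur acc = acc.reverse ++ pvConsFirst cur.reverse (pvF l) := by
  induction fuel with
  | zero =>
    intro l cur acc hl
    have : l = [] := List.length_eq_zero_iff.mp (Nat.le_zero.mp hl)
    subst this
    simp [PySem.Chars.splitOn.go, pvF, pvConsFirst]
  | succ n ih =>
    intro l cur acc hl
    cases l with
    | nil => simp [PySem.Chars.splitOn.go, pvF, pvConsFirst]
    | cons a rest =>
      simp only [PySem.Chars.splitOn.go]
      by_cases ha : a = '\n'
      · subst ha
        rw [if_pos (by simp [List.isPrefixOf])]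
        rw [ih _ _ _ (by simpa using Nat.le_of_succ_le_succ hl)]
        rcases hf : pvF rest with _ | ⟨h, r⟩
        · exact absurd hf (pvF_ne_nil rest)
        · simp [pvF, hf, pvConsFirst]
      · rw [if_neg (by simp [List.isPrefixOf, Ne.symm ha])]
        rw [ih _ _ _ (by simpa using Nat.le_of_succ_le_succ hl)]
        rcases hf : pvF rest with _ | ⟨h, r⟩
        · exact absurd hf (pvF_ne_nil rest)
        · simp [pvF, ha, hf, pvConsFirst]

theorem pvSplitOn_eq_pvF (s : List Char) : PySem.Chars.splitOn s ['\n'] = pvF s := by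
  rw [PySem.Chars.splitOn, pvGo_eq (s.length + 1) s [] [] (by omega)]
  rcases hf : pvF s with _ | ⟨h, r⟩
  · exact absurd hf (pvF_ne_nil s)
  · simp [pvConsFirst]

theorem pvF_no_newline (s : List Char) : ∀ l ∈ pvF s, '\n' ∉ l := by
  induction s with
  | nil => simp [pvF]
  | cons c t ih =>
    intro l hl
    rcases hfe : pvF t with _ | ⟨h, r⟩
    · exact absurd hfe (pvF_ne_nil t)
    · simp only [pvF, hfe] at hl
      by_cases hc : c = '\n'
      · rw [if_pos hc] at hl
        rcases List.mem_cons.mp hl with h0 | h0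
        · subst h0; simp
        · exact ih l (by rw [hfe]; exact h0)
      · rw [if_neg hc] at hl
        rcases List.mem_cons.mp hl with h0 | h0
        · subst h0
          intro hm
          rcases List.mem_cons.mp hm with h1 | h1
          · exact hc h1.symm
          · exact ih h (by rw [hfe]; simp) h1
        · exact ih l (by rw [hfe]; simp [h0])

theorem pvJoin_pvF (s : List Char) : PySem.Chars.join ['\n'] (pvF s) = s := by
  induction s with
  | nil => simp [pvF, PySem.Chars.join_singleton]
  | cons c t ih =>
    rcases hfe : pvF t with _ | ⟨h, r⟩
    · exact absurd hfe (pvF_ne_nil t)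
    · by_cases hc : c = '\n'
      · subst hc
        have hunf : pvF ('\n' :: t) = [] :: pvF t := by simp [pvF]
        rw [hunf, pvJoin_cons _ _ _ (pvF_ne_nil t), ih]
        simp
      · simp only [pvF, if_neg hc, hfe]
        cases r with
        | nil =>
          rw [PySem.Chars.join_singleton]
          rw [hfe, PySem.Chars.join_singleton] at ih
          rw [ih]
        | cons h2 r2 =>
          rw [pvJoin_cons _ _ _ (by simp)]
          rw [hfe, pvJoin_cons _ _ _ (by simp)] at ih
          rw [← ih]
          simp

-- ['\n'] occurs in s iff '\n' ∈ s
theorem pvInfix_singleton_iff (s : List Char) : ['\n'] <:+: s ↔ '\n' ∈ s := by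
  constructor
  · rintro ⟨a, b, hab⟩
    rw [← hab]
    simp
  · intro hm
    obtain ⟨a, b, hab⟩ := List.append_of_mem hm
    exact ⟨a, b, by simp [hab]⟩

theorem pvFind_no_newline (l : List Char) (h : '\n' ∉ l) : PySem.Chars.find l ['\n'] = -1 := by
  rw [PySem.Chars.find_eq_neg_one_iff, pvInfix_singleton_iff]
  exact h

theorem pvFind_boundary (l r : List Char) (h : '\n' ∉ l) :
    PySem.Chars.find (l ++ '\n' :: r) ['\n'] = (l.length : Int) := by
  set s := l ++ '\n' :: r with hs
  have hinf : ['\n'] <:+: s := ⟨l, r, by simp [hs]⟩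
  have hpos : 0 ≤ PySem.Chars.find s ['\n'] := (PySem.Chars.find_nonneg_iff s ['\n']).mpr hinf
  obtain ⟨hpre, hmin⟩ := PySem.Chars.find_spec hpos
  set k := (PySem.Chars.find s ['\n']).toNat with hk
  have hkl : k ≤ l.length := by
    by_contra hgt
    exact hmin l.length (by omega) ⟨r, by simp [hs]⟩
  have hke : k = l.length := by
    rcases Nat.lt_or_ge k l.length with hlt | hge
    · exfalso
      have hdrop : s.drop k = l.drop k ++ '\n' :: r := by
        simp [hs, List.drop_append_of_le_length (le_of_lt hlt)]
      have hhead : ∃ t, s.drop k = '\n' :: t := by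
        rcases hpre with ⟨t, ht⟩
        exact ⟨t, by simpa using ht.symm⟩
      obtain ⟨t, ht⟩ := hhead
      rw [hdrop] at ht
      rcases hld : l.drop k with _ | ⟨c0, t0⟩
      · have : l.length ≤ k := by
          have := congrArg List.length hld
          simp at this
          omega
        omega
      · rw [hld] at ht
        have hc0 : c0 = '\n' := by simpa using congrArg List.head? ht
        exact h (List.mem_of_mem_drop (by rw [hld, hc0]; simp))
    · omega
  omega

-- find? = head? of dropWhile of the negation
theorem pvFind?_eq_head?_dropWhile (q : Char → Bool) (l : List Char) :
    l.find? q = (l.dropWhile (fun a => !q a)).head? := by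
  induction l with
  | nil => simp
  | cons a t ih =>
    by_cases h : q a = true
    · simp [List.find?, List.dropWhile, h]
    · have h' : q a = false := Bool.eq_false_iff.mpr h
      simp [List.find?, List.dropWhile, h', ih]

theorem pvLastSigC_eq (l : List Char) : pvLastSigC l = (PySem.Chars.rstrip l).getLast? := by
  rw [pvLastSigC, pvFind?_eq_head?_dropWhile, PySem.Chars.rstrip, List.getLast?_reverse]
  simp [Bool.not_not]

theorem pvFirstSigC_eq (l2 x : List Char) (h : '\n' ∉ l2)
    (hx : x = [] ∨ ∃ y, x = '\n' :: y) :
    pvFirstSigC (l2 ++ x) = (PySem.Chars.lstrip l2).head? := by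
  induction l2 with
  | nil =>
    rcases hx with hx | ⟨y, hx⟩ <;> simp [hx, pvFirstSigC, PySem.Chars.lstrip]
  | cons a t ih =>
    have ha : a ≠ '\n' := fun he => h (by simp [he])
    by_cases hsp : PySem.Chars.isspace a = true
    · rw [List.cons_append]
      simp only [pvFirstSigC, if_neg ha, hsp]
      simp only [Bool.not_true, Bool.false_eq_true, if_false]
      rw [ih (fun hm => h (by simp [hm]))]
      simp [PySem.Chars.lstrip, hsp]
    · have hsp' : PySem.Chars.isspace a = false := Bool.eq_false_iff.mpr hsp
      rw [List.cons_append]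
      simp only [pvFirstSigC, if_neg ha, hsp']
      simp [PySem.Chars.lstrip, hsp']

-- keep is the negation of the merge condition
theorem pvKeep_eq_not_joins (l l2 : List Char) :
    pvKeep ((PySem.Chars.rstrip l).getLast?) ((PySem.Chars.lstrip l2).head?) = !pvJoins l l2 := by
  rcases hp : (PySem.Chars.rstrip l).getLast? with _ | p
  · have : (PySem.Chars.rstrip l).isEmpty = true := by
      simp [List.getLast?_eq_none_iff.mp hp]
    simp [pvKeep, pvJoins, this]
  · have hne : (PySem.Chars.rstrip l).isEmpty = false := by
      simp only [List.isEmpty_eq_false_iff]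
      intro he
      rw [he] at hp
      simp at hp
    rcases hc : (PySem.Chars.lstrip l2).head? with _ | c
    · have : (PySem.Chars.lstrip l2).isEmpty = true := by
        simp [List.head?_eq_none_iff.mp hc]
      simp [pvKeep, pvJoins, this]
    · have hne2 : (PySem.Chars.lstrip l2).isEmpty = false := by
        simp only [List.isEmpty_eq_false_iff]
        intro he
        rw [he] at hc
        simp at hc
      simp only [pvKeep, pvJoins, hne, hne2, pvGet_neg_one, pvGet_zero, hp, hc]
      simp [Bool.not_and]

-- one loop step of A, seen through the invariant "last merged element = q ++ s"
theorem pvStep_eq (q s c : List Char) (acc : List (List Char))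
    (hinv : q = [] ∨ PySem.Chars.strip s ≠ [])
    (hlast : acc.getLast? = some (q ++ s)) :
    (pvStepA acc c = acc.dropLast ++ [(q ++ s) ++ c] ∧ pvJoins s c = true ∧ PySem.Chars.strip c ≠ [])
    ∨ (pvStepA acc c = acc ++ [c] ∧ pvJoins s c = false) := by
  have hprev : (PySem.List.pyGet? acc (-1)).getD [] = q ++ s := by
    rw [pvGet_neg_one, hlast]; rfl
  by_cases hc : PySem.Chars.strip c = []
  · right
    have hlc : PySem.Chars.lstrip c = [] :=
      (pvLstrip_eq_nil_iff c).mpr ((pvStrip_eq_nil_iff c).mp hc)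
    exact ⟨by simp [pvStepA, hc], by simp [pvJoins, hlc]⟩
  · by_cases hp : PySem.Chars.strip (q ++ s) = []
    · right
      have hall : ∀ x ∈ q ++ s, PySem.Chars.isspace x := (pvStrip_eq_nil_iff _).mp hp
      have hrs : PySem.Chars.rstrip s = [] :=
        (pvRstrip_eq_nil_iff s).mpr (fun x hx => hall x (by simp [hx]))
      exact ⟨by simp [pvStepA, hprev, hc, hp], by simp [pvJoins, hrs]⟩
    · have hss : PySem.Chars.strip s ≠ [] := by
        rcases hinv with hq | hss
        · subst hq; simpa using hp
        · exact hss
      have hrs : PySem.Chars.rstrip s ≠ [] := fun hx =>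
        hss ((pvStrip_eq_nil_iff s).mpr ((pvRstrip_eq_nil_iff s).mp hx))
      have hls : PySem.Chars.lstrip c ≠ [] := fun hx =>
        hc ((pvStrip_eq_nil_iff c).mpr ((pvLstrip_eq_nil_iff c).mp hx))
      have hra : PySem.Chars.rstrip (q ++ s) = q ++ PySem.Chars.rstrip s :=
        pvRstrip_append q s hrs
      have hrane : PySem.Chars.rstrip (q ++ s) ≠ [] := by
        rw [hra]; simp [hrs]
      obtain ⟨p, hpq⟩ : ∃ p, (PySem.Chars.rstrip s).getLast? = some p := by
        rcases hx : (PySem.Chars.rstrip s).getLast? with _ | p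
        · exact absurd (List.getLast?_eq_none_iff.mp hx) hrs
        · exact ⟨p, rfl⟩
      obtain ⟨ch, hch⟩ : ∃ ch, (PySem.Chars.lstrip c).head? = some ch := by
        rcases hx : (PySem.Chars.lstrip c).head? with _ | ch
        · exact absurd (List.head?_eq_none_iff.mp hx) hls
        · exact ⟨ch, rfl⟩
      have hplast : (PySem.Chars.rstrip (q ++ s)).getLast? = some p := by
        rw [hra, List.getLast?_append, hpq]; rfl
      have hAplc : PySem.List.pyGet? (PySem.Chars.rstrip (q ++ s)) (-1) = some p := by
        rw [pvGet_neg_one, hplast]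
      have hBplc : PySem.List.pyGet? (PySem.Chars.rstrip s) (-1) = some p := by
        rw [pvGet_neg_one, hpq]
      have hBcfc : PySem.List.pyGet? (PySem.Chars.lstrip c) 0 = some ch := by
        rw [pvGet_zero, hch]
      have hiff : pvJoins s c = true ↔
          (p ∉ ['.', '!', '?', ':', '"', '\''] ∧ PySem.Chars.islower ch) := by
        simp [pvJoins, hrs, hls, hBplc, hBcfc, List.isEmpty_eq_false_iff, and_assoc]
      by_cases hcond : p ∉ ['.', '!', '?', ':', '"', '\''] ∧ PySem.Chars.islower ch
      · left
        refine ⟨?_, hiff.mpr hcond, hc⟩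
        simp [pvStepA, hprev, hc, hp, hrane, hls, hAplc, hBcfc, hcond]
      · right
        refine ⟨?_, Bool.eq_false_iff.mpr (fun h => hcond (hiff.mp h))⟩
        simp only [pvStepA, hprev]
        rw [if_neg hc, if_neg hp]
        simp only [hrane, ne_eq, not_false_eq_true, if_true, hls, hAplc, hBcfc]
        rw [if_neg hcond]

-- the main loop correspondence for A
theorem pvLoopA (ls : List (List Char)) : ∀ (acc : List (List Char)) (q s : List Char),
    acc ≠ [] → acc.getLast? = some (q ++ s) → (q = [] ∨ PySem.Chars.strip s ≠ []) →
    PySem.Chars.join ['\n'] (ls.foldl pvStepA acc)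
      = (List.zip (s :: ls) ls).foldl
          (fun r pc => if pvJoins pc.1 pc.2 then r ++ pc.2 else r ++ '\n' :: pc.2)
          (PySem.Chars.join ['\n'] acc) := by
  induction ls with
  | nil => intro acc q s _ _ _; simp
  | cons c tl ih =>
    intro acc q s hne hlast hinv
    rcases pvStep_eq q s c acc hinv hlast with ⟨hA, hB, hc⟩ | ⟨hA, hB⟩
    · rw [List.foldl_cons, hA,
        ih (acc.dropLast ++ [(q ++ s) ++ c]) (q ++ s) c (by simp)
          (by rw [List.getLast?_concat]) (Or.inr hc)]
      have hz : List.zip (s :: c :: tl) (c :: tl) = (s, c) :: List.zip (c :: tl) tl := rfl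
      rw [hz, List.foldl_cons, pvJoin_mutate_last ['\n'] acc (q ++ s) c hlast]
      simp [hB]
    · rw [List.foldl_cons, hA,
        ih (acc ++ [c]) [] c (by simp) (by simp) (Or.inl rfl)]
      have hz : List.zip (s :: c :: tl) (c :: tl) = (s, c) :: List.zip (c :: tl) tl := rfl
      rw [hz, List.foldl_cons, pvJoin_append_singleton ['\n'] acc c hne]
      simp [hB]

-- the zip-fold appends to the left: peel the initial segment off
theorem pvZipFold_init (zs : List (List Char × List Char)) :
    ∀ (init : List Char),
    zs.foldl (fun r pc => if pvJoins pc.1 pc.2 then r ++ pc.2 else r ++ '\n' :: pc.2) init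
      = init ++ zs.foldl (fun r pc => if pvJoins pc.1 pc.2 then r ++ pc.2 else r ++ '\n' :: pc.2) [] := by
  induction zs with
  | nil => simp
  | cons z t ih =>
    intro init
    rw [List.foldl_cons, List.foldl_cons, ih, ih (if pvJoins z.1 z.2 then [] ++ z.2 else [] ++ '\n' :: z.2)]
    split <;> simp

theorem pvZipFold_cons (z : List Char × List Char) (zs : List (List Char × List Char))
    (init : List Char) :
    (z :: zs).foldl (fun r pc => if pvJoins pc.1 pc.2 then r ++ pc.2 else r ++ '\n' :: pc.2) init
      = (init ++ if pvJoins z.1 z.2 then z.2 else '\n' :: z.2)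
        ++ zs.foldl (fun r pc => if pvJoins pc.1 pc.2 then r ++ pc.2 else r ++ '\n' :: pc.2) [] := by
  rw [List.foldl_cons, pvZipFold_init zs]
  split <;> simp

-- the main loop correspondence for B
theorem pvLoopB_spec (ls : List (List Char)) : ∀ (pieces : List (List Char)),
    ls ≠ [] → (∀ l ∈ ls, '\n' ∉ l) →
    (pvLoopB (PySem.Chars.join ['\n'] ls) pieces).flatten
      = pieces.flatten ++ (List.zip ls ls.tail).foldl
          (fun r pc => if pvJoins pc.1 pc.2 then r ++ pc.2 else r ++ '\n' :: pc.2)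
          (ls.headD []) := by
  induction ls with
  | nil => intro _ h _; exact absurd rfl h
  | cons l t ih =>
    intro pieces _ hnl
    cases t with
    | nil =>
      rw [PySem.Chars.join_singleton, pvLoopB,
        pvFind_no_newline l (hnl l (by simp))]
      simp
    | cons l2 t2 =>
      have hln : '\n' ∉ l := hnl l (by simp)
      have hl2n : '\n' ∉ l2 := hnl l2 (by simp)
      have hjoin : PySem.Chars.join ['\n'] (l :: l2 :: t2)
          = l ++ '\n' :: PySem.Chars.join ['\n'] (l2 :: t2) := by
        rw [pvJoin_cons _ _ _ (by simp)]; simp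
      have hdrop : (l ++ '\n' :: PySem.Chars.join ['\n'] (l2 :: t2)).drop (l.length + 1)
          = PySem.Chars.join ['\n'] (l2 :: t2) := by
        rw [List.drop_append]
        simp
      have hfs : pvFirstSigC (PySem.Chars.join ['\n'] (l2 :: t2))
          = (PySem.Chars.lstrip l2).head? := by
        cases t2 with
        | nil =>
          rw [PySem.Chars.join_singleton]
          simpa using pvFirstSigC_eq l2 [] hl2n (Or.inl rfl)
        | cons l3 t3 =>
          rw [pvJoin_cons _ _ _ (by simp), List.append_assoc]
          exact pvFirstSigC_eq l2 ('\n' :: PySem.Chars.join ['\n'] (l3 :: t3)) hl2n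
            (Or.inr ⟨_, rfl⟩)
      have htake : (l ++ '\n' :: PySem.Chars.join ['\n'] (l2 :: t2)).take l.length = l :=
        List.take_left' rfl
      rw [hjoin, pvLoopB]
      rw [show PySem.Chars.find (l ++ '\n' :: PySem.Chars.join ['\n'] (l2 :: t2)) ['\n']
            = (l.length : Int) from pvFind_boundary _ _ hln]
      have hne1 : ¬ ((l.length : Int) = -1) := by omega
      rw [if_neg hne1]
      simp only [Int.toNat_natCast, htake, hdrop, hfs, pvLastSigC_eq, pvKeep_eq_not_joins]
      rw [ih _ (by simp) (fun x hx => hnl x (by simp [hx]))]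
      have hz1 : (l :: l2 :: t2).zip (l :: l2 :: t2).tail = (l, l2) :: (l2 :: t2).zip t2 := rfl
      have hz2 : (l2 :: t2).zip (l2 :: t2).tail = (l2 :: t2).zip t2 := rfl
      rw [hz1, pvZipFold_cons, hz2,
        pvZipFold_init ((l2 :: t2).zip t2) ((l2 :: t2).headD [])]
      by_cases hj : pvJoins l l2 = true <;> simp [hj]

-- ===== VERDICT (by name: the statement is the Claim_ definition above) =====
theorem repair_broken_lines_spec : Claim_equal_repair_broken_lines := by
  intro text _
  unfold Spec_repair_broken_lines repair_broken_lines repair_broken_lines_alt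
  rw [pvSplitOn_eq_pvF]
  rcases hf : pvF text.toList with _ | ⟨l0, rest⟩
  · exact absurd hf (pvF_ne_nil _)
  · simp only
    rw [PySem.List.foldl_pyRange_pyGetD (l0 :: rest) [] pvStepA [l0] (by norm_num)]
    have hdrop : List.drop (Int.toNat 1) (l0 :: rest) = rest := rfl
    rw [hdrop, pvLoopA rest [l0] [] l0 (by simp) (by simp) (Or.inl rfl)]
    have hrecon : text.toList = PySem.Chars.join ['\n'] (l0 :: rest) := by
      rw [← hf, pvJoin_pvF]
    rw [hrecon, pvLoopB_spec (l0 :: rest) [] (by simp) (by rw [← hf]; exact pvF_no_newline _)]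
    simp [PySem.Chars.join_singleton]
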